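-- pv_equiv track=rewrite | github.com/NovelleP/AdventOfCode2020 | day7/day7_2.py | count_node_childrens_with_weight
-- ===== SOURCE A (Python) =====
-- def count_node_childrens_with_weight(node_name, visited_nodes, graph):
--     acc = 0
--     for curr_node, curr_weight in graph.get(node_name, []):
--         if curr_node not in visited_nodes:
--             acc += curr_weight + \
--                    curr_weight * \
--                    count_node_childrens_with_weight(curr_node, {*visited_nodes, curr_node}, graph)
--     return acc
-- ===== SOURCE B (Python) =====
-- def count_node_childrens_with_weight(node_name, visited_nodes, graph):
--     # Iterative DFS with an explicit stack carrying the multiplied weight of the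
--     # path, instead of A's recursion; same exact value, no recursion depth limit.
--     total = 0
--     stack = [(node_name, {*visited_nodes}, 1)]
--     while stack:
--         node, vis, mult = stack.pop()
--         for child, weight in graph.get(node, []):
--             if child not in vis:
--                 total += mult * weight
--                 stack.append((child, vis | {child}, mult * weight))
--     return total
-- ===== Notes on version B (the rewrite author's own statement) =====
-- stated objective: alternative
-- what changed: Replaced A's recursive descent by an iterative DFS with an explicit stack whose entries carry the multiplied weight of the path, summing mult*weight per admissible edge instead of combining recursive return values (no recursion depth limit).
import Mathlib
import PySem

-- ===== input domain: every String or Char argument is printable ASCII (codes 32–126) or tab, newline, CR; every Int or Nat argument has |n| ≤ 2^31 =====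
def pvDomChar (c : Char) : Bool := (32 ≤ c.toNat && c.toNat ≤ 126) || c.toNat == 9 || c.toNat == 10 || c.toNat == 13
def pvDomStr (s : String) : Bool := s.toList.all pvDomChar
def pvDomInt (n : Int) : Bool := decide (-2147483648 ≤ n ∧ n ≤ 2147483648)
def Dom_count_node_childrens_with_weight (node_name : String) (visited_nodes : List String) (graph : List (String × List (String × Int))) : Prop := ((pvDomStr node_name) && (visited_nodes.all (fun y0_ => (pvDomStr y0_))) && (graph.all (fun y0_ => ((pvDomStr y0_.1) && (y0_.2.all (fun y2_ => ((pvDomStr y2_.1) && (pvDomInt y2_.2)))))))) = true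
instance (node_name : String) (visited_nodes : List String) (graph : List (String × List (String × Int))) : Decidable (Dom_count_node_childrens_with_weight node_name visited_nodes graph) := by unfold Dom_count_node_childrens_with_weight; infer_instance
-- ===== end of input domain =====

-- B replaces A's recursive descent by an iterative DFS with an explicit stack that carries the
-- multiplied weight of the path (objective: alternative; same values either way).
-- Both versions only test membership of the visited set, so it is carried as a List String.
-- Both ports are made total by structural recursion on a fuel argument proved sufficient in the
-- lemmas below (A's recursion and B's loop always terminate, so the fuel branch is never taken
-- on the values the wrappers pass).

-- graph.get(node_name, []): first-match lookup in the association list (exact: Python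
-- dicts have unique keys, and the convention maps dict to first-match association list).
def pvChildren (graph : List (String × List (String × Int))) (node : String) :
    List (String × Int) :=
  match graph with
  | [] => []
  | (k, v) :: rest => if k = node then v else pvChildren rest node

-- all child names occurring in the graph (fuel bookkeeping)
def pvUniv (graph : List (String × List (String × Int))) : List String :=
  graph.flatMap (fun e => e.2.map Prod.fst)

-- number of graph child names not yet visited (recursion-depth bound)
def pvMu (graph : List (String × List (String × Int))) (visited : List String) : Nat :=
  ((pvUniv graph).toFinset \ visited.toFinset).card

-- ===== PORT A =====
-- the for-loop of A with its accumulator: for (c, w) in children: if c not in visited: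
--   acc += w + w * count(c, visited ∪ {c}); the recursive call is the parameter `count`
def pvGoA (count : String → List String → Int) (visited : List String) :
    List (String × Int) → Int → Int
  | [], acc => acc
  | (c, w) :: rest, acc =>
    if c ∈ visited then pvGoA count visited rest acc
    else pvGoA count visited rest (acc + (w + w * count c (c :: visited)))

-- A's recursion, structurally on fuel; fuel 0 is never reached for the fuel the wrapper passes
def pvCountA (graph : List (String × List (String × Int))) :
    Nat → String → List String → Int
  | 0, _, _ => 0
  | f + 1, node, visited =>
    pvGoA (fun c v' => pvCountA graph f c v') visited (pvChildren graph node) 0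

def count_node_childrens_with_weight (node_name : String) (visited_nodes : List String)
    (graph : List (String × List (String × Int))) : Int :=
  pvCountA graph ((pvUniv graph).length + 1) node_name visited_nodes

-- ===== PORT B =====
-- the inner for-loop of B: collects the pushes (head = top of stack) and adds to total
def pvStep (vis : List String) (mult : Int) (children : List (String × Int))
    (st : List (String × List String × Int) × Int) :
    List (String × List String × Int) × Int :=
  match children, st with
  | [], st => st
  | (c, w) :: cs, (pushed, tot) =>
    if c ∈ vis then pvStep vis mult cs (pushed, tot)
    else pvStep vis mult cs ((c, c :: vis, mult * w) :: pushed, tot + mult * w)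

-- iteration bound for B's while-loop (the stack's total weight, proved decreasing below)
def pvWeight (graph : List (String × List (String × Int))) (vis : List String) : Nat :=
  ((pvUniv graph).length + 1) ^ pvMu graph vis

-- the while-loop of B, structurally on fuel; stack head = Python list's last element (top)
def pvLoopB (graph : List (String × List (String × Int))) :
    Nat → List (String × List String × Int) → Int → Int
  | 0, _, total => total
  | f + 1, stack, total =>
    match stack with
    | [] => total
    | (node, vis, mult) :: rest =>
      pvLoopB graph f ((pvStep vis mult (pvChildren graph node) ([], total)).1 ++ rest)
        (pvStep vis mult (pvChildren graph node) ([], total)).2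

def count_node_childrens_with_weight_alt (node_name : String) (visited_nodes : List String)
    (graph : List (String × List (String × Int))) : Int :=
  pvLoopB graph (pvWeight graph visited_nodes) [(node_name, visited_nodes, 1)] 0

-- ===== PRECONDITION & SPEC =====
def Spec_count_node_childrens_with_weight (node_name : String) (visited_nodes : List String) (graph : List (String × List (String × Int))) (out : Int) : Prop := out = count_node_childrens_with_weight_alt node_name visited_nodes graph
instance (node_name : String) (visited_nodes : List String) (graph : List (String × List (String × Int))) (out : Int) : Decidable (Spec_count_node_childrens_with_weight node_name visited_nodes graph out) := by unfold Spec_count_node_childrens_with_weight; infer_instance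

-- ===== CLAIM (what is proved, stated in full; the proofs are below) =====
def Claim_equal_count_node_childrens_with_weight : Prop := ∀ (node_name : String) (visited_nodes : List String) (graph : List (String × List (String × Int))), Dom_count_node_childrens_with_weight node_name visited_nodes graph → Spec_count_node_childrens_with_weight node_name visited_nodes graph (count_node_childrens_with_weight node_name visited_nodes graph)

-- ===== LEMMAS AND PROOFS =====

theorem pvChildren_names_sub (graph : List (String × List (String × Int))) (node : String) :
    ∀ p ∈ pvChildren graph node, p.1 ∈ pvUniv graph := by
  induction graph with
  | nil => simp [pvChildren]
  | cons e rest ih =>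
    obtain ⟨k, v⟩ := e
    intro p hp
    simp only [pvChildren] at hp
    simp only [pvUniv, List.flatMap_cons, List.mem_append]
    by_cases h : k = node
    · rw [if_pos h] at hp
      exact Or.inl (List.mem_map.mpr ⟨p, hp, rfl⟩)
    · rw [if_neg h] at hp
      exact Or.inr (ih p hp)

theorem pvChildren_length_le (graph : List (String × List (String × Int))) (node : String) :
    (pvChildren graph node).length ≤ (pvUniv graph).length := by
  induction graph with
  | nil => simp [pvChildren]
  | cons e rest ih =>
    obtain ⟨k, v⟩ := e
    simp only [pvChildren, pvUniv, List.flatMap_cons, List.length_append, List.length_map]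
    by_cases h : k = node
    · rw [if_pos h]; omega
    · rw [if_neg h]
      simp only [pvUniv] at ih
      omega

theorem pvMu_le (graph : List (String × List (String × Int))) (visited : List String) :
    pvMu graph visited ≤ (pvUniv graph).length := by
  unfold pvMu
  calc ((pvUniv graph).toFinset \ visited.toFinset).card
      ≤ (pvUniv graph).toFinset.card := Finset.card_le_card (Finset.sdiff_subset)
    _ ≤ (pvUniv graph).length := List.toFinset_card_le _

theorem pvMu_cons_lt (graph : List (String × List (String × Int))) (visited : List String)
    (c : String) (hc : c ∈ pvUniv graph) (hv : c ∉ visited) :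
    pvMu graph (c :: visited) < pvMu graph visited := by
  unfold pvMu
  apply Finset.card_lt_card
  rw [Finset.ssubset_iff_of_subset]
  · exact ⟨c, by simp [hc, hv], by simp⟩
  · intro x hx
    simp only [Finset.mem_sdiff, List.toFinset_cons, Finset.mem_insert,
      List.mem_toFinset] at *
    exact ⟨hx.1, fun h => hx.2 (Or.inr h)⟩

-- generic congruence for A's loop: the recursive calls only matter on unvisited children
theorem pvGoA_congr (cnt1 cnt2 : String → List String → Int) (visited : List String) :
    ∀ (children : List (String × Int)),
      (∀ p ∈ children, p.1 ∉ visited → cnt1 p.1 (p.1 :: visited) = cnt2 p.1 (p.1 :: visited)) →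
      ∀ acc, pvGoA cnt1 visited children acc = pvGoA cnt2 visited children acc := by
  intro children
  induction children with
  | nil => intro _ acc; rfl
  | cons p cs ih =>
    obtain ⟨c, w⟩ := p
    intro h acc
    simp only [pvGoA]
    by_cases hv : c ∈ visited
    · rw [if_pos hv, if_pos hv]
      exact ih (fun q hq => h q (List.mem_cons_of_mem _ hq)) acc
    · rw [if_neg hv, if_neg hv, h (c, w) (List.mem_cons_self ..) hv]
      exact ih (fun q hq => h q (List.mem_cons_of_mem _ hq)) _

-- fuel irrelevance: any two fuels above the depth bound give the same value
theorem pvCountA_suff (graph : List (String × List (String × Int))) :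
    ∀ (f f' : Nat) (node : String) (visited : List String),
      pvMu graph visited < f → pvMu graph visited < f' →
      pvCountA graph f node visited = pvCountA graph f' node visited := by
  intro f
  induction f using Nat.strong_induction_on with
  | _ f ihf =>
    intro f' node visited hf hf'
    match f, f' with
    | fa + 1, fb + 1 =>
      simp only [pvCountA]
      apply pvGoA_congr
      intro p hp hpv
      have hcu : p.1 ∈ pvUniv graph := pvChildren_names_sub graph node p hp
      have hlt : pvMu graph (p.1 :: visited) < pvMu graph visited :=
        pvMu_cons_lt graph visited p.1 hcu hpv
      exact ihf fa (by omega) fb p.1 (p.1 :: visited) (by omega) (by omega)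

-- the per-children-list sum A computes (cnt = the full-fuel recursion)
def pvS (graph : List (String × List (String × Int))) (vis : List String) :
    List (String × Int) → Int
  | [] => 0
  | (c, w) :: cs =>
    (if c ∈ vis then 0 else w + w * count_node_childrens_with_weight c (c :: vis) graph)
      + pvS graph vis cs

theorem pvGoA_eq (cnt : String → List String → Int) (graph : List (String × List (String × Int)))
    (vis : List String) :
    ∀ (cs : List (String × Int)),
      (∀ p ∈ cs, p.1 ∉ vis → cnt p.1 (p.1 :: vis)
        = count_node_childrens_with_weight p.1 (p.1 :: vis) graph) →
      ∀ acc, pvGoA cnt vis cs acc = acc + pvS graph vis cs := by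
  intro cs
  induction cs with
  | nil => intro _ acc; simp [pvGoA, pvS]
  | cons p cs ih =>
    obtain ⟨c, w⟩ := p
    intro h acc
    simp only [pvGoA, pvS]
    by_cases hv : c ∈ vis
    · rw [if_pos hv, if_pos hv, ih (fun q hq => h q (List.mem_cons_of_mem _ hq)) acc]
      ring
    · rw [if_neg hv, if_neg hv, h (c, w) (List.mem_cons_self ..) hv,
        ih (fun q hq => h q (List.mem_cons_of_mem _ hq)) _]
      ring

-- A's defining equation, at the wrapper level
theorem count_eq_S (node : String) (vis : List String)
    (graph : List (String × List (String × Int))) :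
    count_node_childrens_with_weight node vis graph = pvS graph vis (pvChildren graph node) := by
  unfold count_node_childrens_with_weight
  simp only [pvCountA]
  rw [pvGoA_eq]
  · exact Int.zero_add _
  · intro p hp hpv
    have hcu : p.1 ∈ pvUniv graph := pvChildren_names_sub graph node p hp
    have hlt : pvMu graph (p.1 :: vis) < pvMu graph vis := pvMu_cons_lt graph vis p.1 hcu hpv
    have hle := pvMu_le graph vis
    exact pvCountA_suff graph ((pvUniv graph).length) ((pvUniv graph).length + 1) p.1
      (p.1 :: vis) (by omega) (by omega)

-- ----- B side -----

def pvStackW (graph : List (String × List (String × Int)))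
    (stack : List (String × List String × Int)) : Nat :=
  (stack.map (fun t => pvWeight graph t.2.1)).sum

def pvBound (graph : List (String × List (String × Int))) (vis : List String) : Nat :=
  if pvMu graph vis = 0 then 0 else ((pvUniv graph).length + 1) ^ (pvMu graph vis - 1)

theorem pvStep_W_le (graph : List (String × List (String × Int))) (vis : List String)
    (mult : Int) (children : List (String × Int))
    (hcs : ∀ p ∈ children, p.1 ∈ pvUniv graph) :
    ∀ (P : List (String × List String × Int)) (t : Int),
      pvStackW graph (pvStep vis mult children (P, t)).1
        ≤ pvStackW graph P + children.length * pvBound graph vis := by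
  induction children with
  | nil => intro P t; simp [pvStep]
  | cons p cs ih =>
    obtain ⟨c, w⟩ := p
    intro P t
    have hc : c ∈ pvUniv graph := hcs (c, w) (List.mem_cons_self ..)
    have hcs' : ∀ p ∈ cs, p.1 ∈ pvUniv graph := fun p hp => hcs p (List.mem_cons_of_mem _ hp)
    simp only [pvStep]
    by_cases hv : c ∈ vis
    · rw [if_pos hv]
      have := ih hcs' P t
      have hsm : (cs.length + 1) * pvBound graph vis
          = cs.length * pvBound graph vis + pvBound graph vis := Nat.succ_mul _ _
      simp only [List.length_cons]
      omega
    · rw [if_neg hv]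
      have := ih hcs' ((c, c :: vis, mult * w) :: P) (t + mult * w)
      have hmu : pvMu graph (c :: vis) < pvMu graph vis := pvMu_cons_lt graph vis c hc hv
      have hw : pvWeight graph (c :: vis) ≤ pvBound graph vis := by
        unfold pvWeight pvBound
        rw [if_neg (by omega)]
        exact Nat.pow_le_pow_right (by omega) (by omega)
      have hP : pvStackW graph ((c, c :: vis, mult * w) :: P) =
          pvWeight graph (c :: vis) + pvStackW graph P := by
        simp [pvStackW]
      have hsm : (cs.length + 1) * pvBound graph vis
          = cs.length * pvBound graph vis + pvBound graph vis := Nat.succ_mul _ _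
      simp only [List.length_cons]
      omega

theorem pvStep_W_lt (graph : List (String × List (String × Int))) (node : String)
    (vis : List String) (mult : Int) (t : Int) :
    pvStackW graph (pvStep vis mult (pvChildren graph node) ([], t)).1
      < pvWeight graph vis := by
  have h := pvStep_W_le graph vis mult (pvChildren graph node)
    (pvChildren_names_sub graph node) [] t
  have hlen := pvChildren_length_le graph node
  have hW0 : pvStackW graph ([] : List (String × List String × Int)) = 0 := by simp [pvStackW]
  rw [hW0, Nat.zero_add] at h
  unfold pvWeight
  by_cases hmu : pvMu graph vis = 0
  · have : pvBound graph vis = 0 := by simp [pvBound, hmu]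
    rw [this] at h
    simp only [hmu, pow_zero]
    omega
  · have hB : pvBound graph vis = ((pvUniv graph).length + 1) ^ (pvMu graph vis - 1) := by
      simp [pvBound, hmu]
    rw [hB] at h
    have hpos : 0 < ((pvUniv graph).length + 1) ^ (pvMu graph vis - 1) := Nat.pow_pos (by omega)
    have hpow : ((pvUniv graph).length + 1) ^ pvMu graph vis =
        ((pvUniv graph).length + 1) ^ (pvMu graph vis - 1) * ((pvUniv graph).length + 1) := by
      rw [← pow_succ]
      congr 1
      omega
    rw [hpow]
    have h2 : (pvChildren graph node).length * ((pvUniv graph).length + 1) ^ (pvMu graph vis - 1)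
        ≤ (pvUniv graph).length * ((pvUniv graph).length + 1) ^ (pvMu graph vis - 1) :=
      Nat.mul_le_mul_right _ hlen
    have h3 : (pvUniv graph).length * ((pvUniv graph).length + 1) ^ (pvMu graph vis - 1)
        < ((pvUniv graph).length + 1) ^ (pvMu graph vis - 1) * ((pvUniv graph).length + 1) := by
      nlinarith
    omega

-- value of a whole stack: Σ mult · count(node, vis)
def pvT (graph : List (String × List (String × Int)))
    (stack : List (String × List String × Int)) : Int :=
  (stack.map (fun t => t.2.2 * count_node_childrens_with_weight t.1 t.2.1 graph)).sum

theorem pvStep_spec (graph : List (String × List (String × Int))) (vis : List String)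
    (mult : Int) :
    ∀ (cs : List (String × Int)) (P : List (String × List String × Int)) (t : Int),
      pvT graph (pvStep vis mult cs (P, t)).1 + (pvStep vis mult cs (P, t)).2
        = pvT graph P + t + mult * pvS graph vis cs := by
  intro cs
  induction cs with
  | nil => intro P t; simp [pvStep, pvS]
  | cons p cs ih =>
    obtain ⟨c, w⟩ := p
    intro P t
    simp only [pvStep, pvS]
    by_cases hv : c ∈ vis
    · rw [if_pos hv, if_pos hv, ih]
      ring
    · rw [if_neg hv, if_neg hv, ih]
      simp only [pvT, List.map_cons, List.sum_cons]
      ring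

theorem pvStackW_nil_of_zero (graph : List (String × List (String × Int)))
    (stack : List (String × List String × Int)) (h : pvStackW graph stack = 0) :
    stack = [] := by
  match stack with
  | [] => rfl
  | (n, v, m) :: rest =>
    exfalso
    have hpos : 0 < pvWeight graph v := Nat.pow_pos (by omega)
    simp only [pvStackW, List.map_cons, List.sum_cons] at h
    omega

-- the loop invariant: with enough fuel, the loop adds the stack's value to the total
theorem pvLoopB_eq (graph : List (String × List (String × Int))) :
    ∀ (f : Nat) (stack : List (String × List String × Int)) (total : Int),
      pvStackW graph stack ≤ f →
      pvLoopB graph f stack total = total + pvT graph stack := by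
  intro f
  induction f with
  | zero =>
    intro stack total h
    rw [pvStackW_nil_of_zero graph stack (by omega)]
    simp [pvLoopB, pvT]
  | succ f ihf =>
    intro stack total h
    match stack with
    | [] => simp [pvLoopB, pvT]
    | (node, vis, mult) :: rest =>
      simp only [pvLoopB]
      have hlt := pvStep_W_lt graph node vis mult total
      have happ : pvStackW graph ((pvStep vis mult (pvChildren graph node) ([], total)).1 ++ rest)
          = pvStackW graph (pvStep vis mult (pvChildren graph node) ([], total)).1
            + pvStackW graph rest := by
        simp [pvStackW]
      have hcons : pvStackW graph ((node, vis, mult) :: rest)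
          = pvWeight graph vis + pvStackW graph rest := by
        simp [pvStackW]
      rw [ihf _ _ (by omega)]
      have hs := pvStep_spec graph vis mult (pvChildren graph node) [] total
      simp only [pvT, List.map_nil, List.sum_nil, Int.zero_add] at hs
      rw [← count_eq_S] at hs
      simp only [pvT, List.map_append, List.sum_append, List.map_cons, List.sum_cons] at *
      omega

-- ===== VERDICT (by name: the statement is the Claim_ definition above) =====
theorem count_node_childrens_with_weight_spec : Claim_equal_count_node_childrens_with_weight := by
  intro node_name visited_nodes graph _
  unfold Spec_count_node_childrens_with_weight count_node_childrens_with_weight_alt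
  rw [pvLoopB_eq graph _ _ _ (by simp [pvStackW])]
  simp [pvT]
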